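-- pv_equiv track=rewrite | github.com/Rodrick2550/predictive-table | utilis.py | utils
-- ===== SOURCE A (Python) =====
-- def utils(input_string):
--
--     reserved_words = ['automata', 'alfabeto', 'aceptacion']
--
--
--     split_chars = "{:;,}"
--
--
--     tokens = []
--     current_token = ""
--     for char in input_string:
--         if char in split_chars or char.isspace():
--             if current_token:
--                 tokens.append(current_token)
--                 current_token = ""
--             if char in split_chars:
--                 tokens.append(char)
--         else:
--             current_token += char
--
--     if current_token:
--         tokens.append(current_token)
--
--
--     final_tokens = []
--     for token in tokens:
--         if token in reserved_words:
--             final_tokens.append(token)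
--         else:
--             buffer = ""
--             for char in token:
--                 if char.isdigit() or char in split_chars:
--                     if buffer:
--                         final_tokens.append(buffer)
--                         buffer = ""
--                     final_tokens.append(char)
--                 else:
--                     buffer += char
--             if buffer:
--                 final_tokens.append(buffer)
--
--     return final_tokens
-- ===== SOURCE B (Python) =====
-- def utils(input_string):
--     split_chars = "{:;,}"
--     tokens = []
--     buffer = []
--     for char in input_string:
--         if char in split_chars:
--             if buffer:
--                 tokens.append("".join(buffer))
--                 buffer = []
--             tokens.append(char)
--         elif char.isspace():
--             if buffer:
--                 tokens.append("".join(buffer))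
--                 buffer = []
--         elif char.isdigit():
--             if buffer:
--                 tokens.append("".join(buffer))
--                 buffer = []
--             tokens.append(char)
--         else:
--             buffer.append(char)
--     if buffer:
--         tokens.append("".join(buffer))
--     return tokens
-- ===== Notes on version B (the rewrite author's own statement) =====
-- stated objective: faster
-- what changed: Replaces A's two passes (split on delimiters/whitespace into an intermediate token list, then re-scan each token to split out digits, with a reserved-words branch) by one fused single-buffer pass that flushes on delimiter/space/digit, dropping the intermediate list and the reserved-words branch which is provably a no-op.
import Mathlib
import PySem

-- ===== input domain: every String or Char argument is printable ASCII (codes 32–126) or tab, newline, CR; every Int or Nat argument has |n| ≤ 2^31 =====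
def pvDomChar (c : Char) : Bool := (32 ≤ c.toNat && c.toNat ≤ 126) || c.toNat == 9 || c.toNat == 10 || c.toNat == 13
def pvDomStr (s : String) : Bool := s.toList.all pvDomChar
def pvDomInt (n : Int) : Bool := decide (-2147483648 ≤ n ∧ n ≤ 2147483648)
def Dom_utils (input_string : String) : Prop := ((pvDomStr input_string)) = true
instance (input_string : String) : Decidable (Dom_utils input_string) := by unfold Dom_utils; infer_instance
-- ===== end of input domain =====

-- B fuses A's two passes (split on delimiters/whitespace, then re-split tokens on digits) into one
-- buffered pass without the intermediate token list, dropping the redundant reserved-words branch; the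
-- timing run measured B ≥ 1.5× faster at the largest generated size (constant-factor: one pass, no rescan).

-- ===== PORT A =====
-- split_chars = "{:;,}" ; 'char in split_chars' for a 1-char string is exactly list membership
def pvSplitChars : List Char := "{:;,}".toList

def pvReserved : List (List Char) := ["automata".toList, "alfabeto".toList, "aceptacion".toList]

-- first loop of A: state = current_token (cur); emits tokens, final flush included
def pvPass1 : List Char → List Char → List (List Char)
  | cur, [] => if cur = [] then [] else [cur]
  | cur, c :: cs =>
    if pvSplitChars.contains c || PySem.Chars.isspace c then
      (if cur = [] then [] else [cur]) ++ (if pvSplitChars.contains c then [[c]] else []) ++ pvPass1 [] cs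
    else
      pvPass1 (cur ++ [c]) cs

-- inner loop of A's second pass: state = buffer
def pvSplitGo : List Char → List Char → List (List Char)
  | buf, [] => if buf = [] then [] else [buf]
  | buf, c :: cs =>
    if PySem.Chars.isdigit c || pvSplitChars.contains c then
      (if buf = [] then [] else [buf]) ++ [c] :: pvSplitGo [] cs
    else
      pvSplitGo (buf ++ [c]) cs

-- one iteration of A's second loop (the reserved-word branch kept literally)
def pvPass2Step (tok : List Char) : List (List Char) :=
  if pvReserved.contains tok then [tok] else pvSplitGo [] tok

def utils (input_string : String) : List String :=
  (((pvPass1 [] input_string.toList).flatMap pvPass2Step).map String.ofList)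

-- ===== PORT B =====
-- B's single loop: state = buffer; flush on delimiter/space/digit, delimiter and digit chars emitted alone
def pvAltGo : List Char → List Char → List (List Char)
  | buf, [] => if buf = [] then [] else [buf]
  | buf, c :: cs =>
    if pvSplitChars.contains c then
      (if buf = [] then [] else [buf]) ++ [c] :: pvAltGo [] cs
    else if PySem.Chars.isspace c then
      (if buf = [] then [] else [buf]) ++ pvAltGo [] cs
    else if PySem.Chars.isdigit c then
      (if buf = [] then [] else [buf]) ++ [c] :: pvAltGo [] cs
    else
      pvAltGo (buf ++ [c]) cs

def utils_alt (input_string : String) : List String :=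
  (pvAltGo [] input_string.toList).map String.ofList

-- ===== PRECONDITION & SPEC =====
def Spec_utils (input_string : String) (out : List String) : Prop := out = utils_alt input_string
instance (input_string : String) (out : List String) : Decidable (Spec_utils input_string out) := by unfold Spec_utils; infer_instance

-- ===== CLAIM (what is proved, stated in full; the proofs are below) =====
def Claim_equal_utils : Prop := ∀ (input_string : String), Dom_utils input_string → Spec_utils input_string (utils input_string)

-- ===== LEMMAS AND PROOFS =====

-- the reserved-word branch of A is a no-op: reserved words contain no digit/delimiter
theorem pvPass2Step_eq (tok : List Char) : pvPass2Step tok = pvSplitGo [] tok := by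
  unfold pvPass2Step
  split
  · next h =>
    have h' : tok ∈ pvReserved := by simpa using h
    simp only [pvReserved, List.mem_cons] at h'
    rcases h' with h' | h' | h' | h' <;> simp_all <;> subst h' <;> decide
  · rfl

-- decomposition of pvSplitGo's state: tokens already emitted, and the pending buffer
def pvStep (st : List (List Char) × List Char) (c : Char) : List (List Char) × List Char :=
  if PySem.Chars.isdigit c || pvSplitChars.contains c then
    (st.1 ++ (if st.2 = [] then [] else [st.2]) ++ [[c]], [])
  else
    (st.1, st.2 ++ [c])

def pvHB (cur : List Char) : List (List Char) × List Char := cur.foldl pvStep ([], [])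

theorem pvHB_concat (cur : List Char) (c : Char) :
    pvHB (cur ++ [c]) = pvStep (pvHB cur) c := by
  simp [pvHB, List.foldl_append]

theorem pvFoldl_splitGo (cs : List Char) : ∀ (buf : List Char) (out : List (List Char)),
    (cs.foldl pvStep (out, buf)).1 ++
      (if (cs.foldl pvStep (out, buf)).2 = [] then [] else [(cs.foldl pvStep (out, buf)).2]) =
    out ++ pvSplitGo buf cs := by
  induction cs with
  | nil => intro buf out; simp [pvSplitGo]
  | cons c cs ih =>
    intro buf out
    by_cases h : (PySem.Chars.isdigit c || pvSplitChars.contains c) = true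
    · simp only [List.foldl_cons, pvStep, h, if_pos, pvSplitGo]
      rw [ih]
      simp
    · simp only [List.foldl_cons, pvStep, h, pvSplitGo]
      rw [ih]
      simp

theorem pvSplitGo_eq_HB (cur : List Char) :
    pvSplitGo [] cur = (pvHB cur).1 ++ (if (pvHB cur).2 = [] then [] else [(pvHB cur).2]) := by
  have := pvFoldl_splitGo cur [] []
  simp only [pvHB]
  simpa using this.symm

-- A's flush of the current token, seen through the digit-splitting of pass 2
theorem pvFlushFlat (cur : List Char) :
    ((if cur = [] then [] else [cur]) : List (List Char)).flatMap (pvSplitGo []) =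
      (pvHB cur).1 ++ (if (pvHB cur).2 = [] then [] else [(pvHB cur).2]) := by
  by_cases h : cur = []
  · subst h; simp [pvHB]
  · simp only [if_neg h, List.flatMap_cons, List.flatMap_nil, List.append_nil]
    exact pvSplitGo_eq_HB cur

-- main invariant: A's remaining output equals B's, with B's buffer = pending part of A's current token
theorem pvMain (cs : List Char) : ∀ (cur : List Char),
    (pvPass1 cur cs).flatMap (pvSplitGo []) = (pvHB cur).1 ++ pvAltGo (pvHB cur).2 cs := by
  induction cs with
  | nil =>
    intro cur
    simp only [pvPass1, pvAltGo]
    exact pvFlushFlat cur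
  | cons c cs ih =>
    intro cur
    by_cases hsp : c ∈ pvSplitChars
    · -- delimiter: both flush and emit [c]
      rw [show pvPass1 cur (c :: cs)
            = (if cur = [] then [] else [cur]) ++ ([[c]] ++ pvPass1 [] cs) from by
          simp [pvPass1, hsp]]
      rw [List.flatMap_append, List.flatMap_append, pvFlushFlat, ih []]
      simp [pvAltGo, hsp, pvSplitGo, pvHB]
    · by_cases hws : PySem.Chars.isspace c = true
      · -- whitespace: both flush only
        rw [show pvPass1 cur (c :: cs)
              = (if cur = [] then [] else [cur]) ++ pvPass1 [] cs from by
            simp [pvPass1, hsp, hws]]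
        rw [List.flatMap_append, pvFlushFlat, ih []]
        simp [pvAltGo, hsp, hws, pvHB]
      · -- A appends c to its token; B's state advances by pvStep
        rw [show pvPass1 cur (c :: cs) = pvPass1 (cur ++ [c]) cs from by
            simp [pvPass1, hsp, hws]]
        rw [ih (cur ++ [c]), pvHB_concat]
        by_cases hd : PySem.Chars.isdigit c = true
        · simp [pvStep, pvAltGo, hsp, hws, hd]
        · simp [pvStep, pvAltGo, hsp, hws, hd]

-- ===== VERDICT (by name: the statement is the Claim_ definition above) =====
theorem utils_spec : Claim_equal_utils := by
  intro s _
  unfold Spec_utils utils utils_alt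
  have h1 : pvPass2Step = pvSplitGo [] := funext pvPass2Step_eq
  rw [h1, pvMain s.toList []]
  rfl
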